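/- GENERATED by farm/mkstatement.py from design/units.tsv (unit `DGifGetScreenDesc.COMPOSITION`) and the Specs of Gif/Spec/*.lean — do not edit.
   THE STATEMENT of the proof unit `DGifGetScreenDesc.COMPOSITION`: the function `DGifGetScreenDesc` (176 instructions) satisfies its contract,
   GIVEN THE STATEMENTS OF ITS 8 SEGMENTS (`Gif.Spec.DGifGetScreenDesc.Seg<k> Lay μ u₀`: what the unit `DGifGetScreenDesc.<k>` proves).
   No machine code is walked: `ReachVia.trans` along the segments (the exit assertion of a segment is the entry assertion of
   its successor), an induction on the loop measures. What the names mean: ProgX/Base/Spec/Basic.lean. The theorem to prove: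
   `theorem DGifGetScreenDesc_COMPOSITION_ok : Gif.Spec.DGifGetScreenDesc_COMPOSITION.Statement`. -/
import Gif.Code
import Gif.Dec.All
import Gif.Labels
import Gif.Spec.Desc
import Gif.Spec.Seg_DGifGetScreenDesc
namespace Gif.Spec.DGifGetScreenDesc_COMPOSITION
open X86 X86.User Asan

/-- The statement of unit `DGifGetScreenDesc.COMPOSITION`. -/
def Statement : Prop :=
  ∀ (Lay : Layout) (_hLay : Lay.hi = 0x1000000) (μ : Microarch) (_hμ : UserX.MicroOK μ) (u₀ : State)
    (_h_DGifGetScreenDesc_P : Gif.Spec.DGifGetScreenDesc.SegP Lay μ u₀)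
    (_h_DGifGetScreenDesc_1 : Gif.Spec.DGifGetScreenDesc.Seg1 Lay μ u₀)
    (_h_DGifGetScreenDesc_2 : Gif.Spec.DGifGetScreenDesc.Seg2 Lay μ u₀)
    (_h_DGifGetScreenDesc_3 : Gif.Spec.DGifGetScreenDesc.Seg3 Lay μ u₀)
    (_h_DGifGetScreenDesc_4 : Gif.Spec.DGifGetScreenDesc.Seg4 Lay μ u₀)
    (_h_DGifGetScreenDesc_5 : Gif.Spec.DGifGetScreenDesc.Seg5 Lay μ u₀)
    (_h_DGifGetScreenDesc_6 : Gif.Spec.DGifGetScreenDesc.Seg6 Lay μ u₀)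
    (_h_DGifGetScreenDesc_E : Gif.Spec.DGifGetScreenDesc.SegE Lay μ u₀),
    ∀ (H : Heap) (rest : List Obj) (frames : List (Nat × FrameLayout)) (F : Forest) (R : Rd), Calls Lay μ ProgX.Base.WayInv (ProgX.Base.conv u₀) Gif.L.DGifGetScreenDesc.entry (Gif.Spec.DGifGetScreenDesc.spec H rest frames F R)

end Gif.Spec.DGifGetScreenDesc_COMPOSITION
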